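-- pv_equiv track=rewrite | github.com/johnnyflame/EPI-study-notes | hash_tables.py | find_nearest_repetition
-- ===== SOURCE A (Python) =====
-- def find_nearest_repetition(paragraph):
--     word_to_latest_index, nearest_repeated_distance = {}, float('inf')
--
--     for i, word in enumerate(paragraph):
--         if word in word_to_latest_index:
--             latest_equal_word = word_to_latest_index[word]
--             nearest_repeated_distance = min(nearest_repeated_distance,
--                                             i - latest_equal_word)
--
--         word_to_latest_index[word] = i
--
--     return nearest_repeated_distance if nearest_repeated_distance != float('inf') else -1
-- ===== SOURCE B (Python) =====
-- def find_nearest_repetition(paragraph):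
--     positions = {}
--     for i, word in enumerate(paragraph):
--         positions.setdefault(word, []).append(i)
--     best = float('inf')
--     for idxs in positions.values():
--         for a, b in zip(idxs, idxs[1:]):
--             best = min(best, b - a)
--     return best if best != float('inf') else -1
-- ===== Notes on version B (the rewrite author's own statement) =====
-- stated objective: alternative
-- what changed: Replaces the single-pass last-index dict with a two-phase decomposition: first group every word's occurrence indices into a dict of index lists, then take the minimum over consecutive gaps within each group.
import Mathlib
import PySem

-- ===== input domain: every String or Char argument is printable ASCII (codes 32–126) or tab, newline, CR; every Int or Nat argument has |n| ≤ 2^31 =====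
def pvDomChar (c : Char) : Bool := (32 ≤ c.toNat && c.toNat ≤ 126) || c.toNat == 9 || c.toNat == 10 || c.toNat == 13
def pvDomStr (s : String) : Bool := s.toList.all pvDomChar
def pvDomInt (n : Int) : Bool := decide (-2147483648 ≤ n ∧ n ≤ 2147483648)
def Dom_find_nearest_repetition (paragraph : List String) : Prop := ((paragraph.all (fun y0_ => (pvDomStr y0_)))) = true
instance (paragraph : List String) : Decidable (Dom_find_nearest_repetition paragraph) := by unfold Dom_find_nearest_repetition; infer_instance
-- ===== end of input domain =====

-- B replaces A's single-pass last-index dict by a two-phase decomposition (group each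
-- word's occurrence indices, then minimise consecutive gaps per group); same cost, alternative structure.

-- min(x, y) where x is float('inf') (none) or an int (some)
def pvMinInf (a : Option Int) (x : Int) : Int := match a with | none => x | some b => min b x

-- ===== PORT A =====
def find_nearest_repetition (paragraph : List String) : Int :=
  let st := (PySem.List.enumerate paragraph).foldl
    (fun (s : PySem.Dict String Int × Option Int) q =>
      let nrd := if s.1.contains q.2 then
          -- latest_equal_word = d[word] (guarded by the contains test, so getD is exact)
          some (pvMinInf s.2 (q.1 - s.1.getD q.2 0))
        else s.2
      (s.1.insert q.2 q.1, nrd))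
    (PySem.Dict.empty, none)
  match st.2 with | some v => v | none => -1

-- ===== PORT B =====
def find_nearest_repetition_alt (paragraph : List String) : Int :=
  let positions := (PySem.List.enumerate paragraph).foldl
    (fun (d : PySem.Dict String (List Int)) q => d.modify q.2 [] (· ++ [q.1]))
    PySem.Dict.empty
  let best := positions.values.foldl
    (fun acc idxs => (idxs.zip idxs.tail).foldl
        (fun (a : Option Int) pr => some (pvMinInf a (pr.2 - pr.1))) acc)
    (none : Option Int)
  match best with | some v => v | none => -1

-- ===== PRECONDITION & SPEC =====
def Spec_find_nearest_repetition (paragraph : List String) (out : Int) : Prop := out = find_nearest_repetition_alt paragraph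
instance (paragraph : List String) (out : Int) : Decidable (Spec_find_nearest_repetition paragraph out) := by unfold Spec_find_nearest_repetition; infer_instance

-- ===== CLAIM (what is proved, stated in full; the proofs are below) =====
def Claim_equal_find_nearest_repetition : Prop := ∀ (paragraph : List String), Dom_find_nearest_repetition paragraph → Spec_find_nearest_repetition paragraph (find_nearest_repetition paragraph)

-- ===== LEMMAS AND PROOFS =====

-- min on Option Int, none = +inf
def omin (a b : Option Int) : Option Int := match a, b with
  | none, y => y
  | some x, none => some x
  | some x, some y => some (min x y)

lemma omin_none_right (a : Option Int) : omin a none = a := by cases a <;> rfl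
lemma omin_some (a : Option Int) (x : Int) : omin a (some x) = some (pvMinInf a x) := by
  cases a <;> rfl
lemma omin_assoc (a b c : Option Int) : omin (omin a b) c = omin a (omin b c) := by
  cases a <;> cases b <;> cases c <;> simp [omin, min_assoc]
lemma omin_comm (a b : Option Int) : omin a b = omin b a := by
  cases a <;> cases b <;> simp [omin, min_comm]

-- indices of the occurrences of w in p
def pvOcc (p : List String) (w : String) : List Int :=
  ((PySem.List.enumerate p).filter (fun q => q.2 == w)).map (·.1)

-- min of consecutive gaps
def pvGmin (l : List Int) : Option Int :=
  (l.zip l.tail).foldl (fun a pr => omin a (some (pr.2 - pr.1))) none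

-- min of f over a list of words
def pvBig (f : String → Option Int) (l : List String) : Option Int :=
  l.foldl (fun a w => omin a (f w)) none

lemma foldl_omin_pull {α : Type} (g : α → Option Int) (l : List α) (a : Option Int) :
    l.foldl (fun acc x => omin acc (g x)) a = omin a (l.foldl (fun acc x => omin acc (g x)) none) := by
  induction l generalizing a with
  | nil => simp [omin_none_right]
  | cons x t ih =>
    simp only [List.foldl_cons]
    rw [ih (omin a (g x)), ih (omin none (g x))]
    rw [show omin none (g x) = g x from by cases g x <;> rfl, omin_assoc]

lemma zip_tail_snoc (l : List Int) (n : Int) (h : l ≠ []) :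
    (l ++ [n]).zip ((l ++ [n]).tail) = l.zip l.tail ++ [(l.getLast h, n)] := by
  induction l with
  | nil => exact absurd rfl h
  | cons a t ih =>
    cases t with
    | nil => rfl
    | cons b t' =>
      have := ih (by simp)
      simp only [List.cons_append, List.tail_cons] at this ⊢
      rw [List.zip_cons_cons, this]
      simp [List.getLast]

lemma pvGmin_snoc (l : List Int) (n : Int) (h : l ≠ []) :
    pvGmin (l ++ [n]) = omin (pvGmin l) (some (n - l.getLast h)) := by
  unfold pvGmin
  rw [zip_tail_snoc l n h, List.foldl_append]
  rfl

lemma pvOcc_snoc (p : List String) (x w : String) :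
    pvOcc (p ++ [x]) w = pvOcc p w ++ (if x = w then [(p.length : Int)] else []) := by
  unfold pvOcc
  rw [PySem.List.enumerate_append]
  simp only [PySem.List.enumerate_cons, PySem.List.enumerate_nil, List.filter_append,
    List.map_append]
  congr 1
  by_cases hx : x = w <;> simp [hx]

lemma pvOcc_eq_nil_iff (p : List String) (w : String) : pvOcc p w = [] ↔ w ∉ p := by
  unfold pvOcc
  rw [List.map_eq_nil_iff, List.filter_eq_nil_iff]
  constructor
  · intro hf hw
    have := PySem.List.map_snd_enumerate (xs := p) (s := 0)
    rw [← this] at hw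
    obtain ⟨q, hq, hq2⟩ := List.mem_map.mp hw
    exact absurd (by simp [hq2]) (hf q hq)
  · intro hw q hq hq2
    have : q.2 ∈ (PySem.List.enumerate p 0).map (·.2) := List.mem_map_of_mem hq
    rw [PySem.List.map_snd_enumerate] at this
    simp at hq2
    exact hw (hq2 ▸ this)

lemma pvBig_congr (f f' : String → Option Int) (l : List String)
    (h : ∀ w ∈ l, f' w = f w) : pvBig f' l = pvBig f l := by
  unfold pvBig
  induction l with
  | nil => rfl
  | cons x t ih =>
    simp only [List.foldl_cons]
    rw [h x (by simp)]
    rw [foldl_omin_pull, foldl_omin_pull (g := f)]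
    congr 1
    exact ih (fun w hw => h w (by simp [hw]))

lemma pvBig_snoc (f : String → Option Int) (l : List String) (x : String) :
    pvBig f (l ++ [x]) = omin (pvBig f l) (f x) := by
  unfold pvBig
  rw [List.foldl_append]
  rfl

lemma pvBig_update (f f' : String → Option Int) (l : List String) (x : String) (c : Option Int)
    (hx : x ∈ l) (hn : l.Nodup)
    (hsame : ∀ w ∈ l, w ≠ x → f' w = f w) (hfx : f' x = omin (f x) c) :
    pvBig f' l = omin (pvBig f l) c := by
  induction l with
  | nil => simp at hx
  | cons y t ih =>
    have hstep : ∀ (g : String → Option Int), pvBig g (y :: t) = omin (g y) (pvBig g t) := by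
      intro g
      unfold pvBig
      simp only [List.foldl_cons]
      rw [foldl_omin_pull]
      rw [show omin none (g y) = g y from by cases g y <;> rfl]
    rw [hstep f', hstep f]
    rcases List.mem_cons.mp hx with rfl | hxt
    · have hnot : x ∉ t := (List.nodup_cons.mp hn).1
      rw [pvBig_congr f f' t (fun w hw => hsame w (List.mem_cons_of_mem _ hw) (fun h => hnot (h ▸ hw)))]
      rw [hfx, omin_assoc, omin_comm c (pvBig f t), ← omin_assoc]
    · rw [hsame y (by simp) (fun h => (List.nodup_cons.mp hn).1 (h ▸ hxt)),
          ih hxt (List.nodup_cons.mp hn).2 (fun w hw hne => hsame w (List.mem_cons_of_mem _ hw) hne),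
          ← omin_assoc]

lemma dedup_snoc (p : List String) (x : String) :
    PySem.List.dedup (p ++ [x]) =
      if x ∈ p then PySem.List.dedup p else PySem.List.dedup p ++ [x] := by
  simp only [PySem.List.dedup_eq_ofList, PySem.Set.ofList_append, PySem.Set.update_cons,
    PySem.Set.update_nil, PySem.Set.add, PySem.Set.contains_eq_listContains,
    List.contains_eq_mem, decide_eq_true_eq, PySem.Set.mem_ofList]

-- A's loop, named for the proofs
def pvAfold (p : List String) : PySem.Dict String Int × Option Int :=
  (PySem.List.enumerate p).foldl
    (fun (s : PySem.Dict String Int × Option Int) q =>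
      let nrd := if s.1.contains q.2 then
          some (pvMinInf s.2 (q.1 - s.1.getD q.2 0))
        else s.2
      (s.1.insert q.2 q.1, nrd))
    (PySem.Dict.empty, none)

lemma pvAfold_snoc (p : List String) (x : String) :
    pvAfold (p ++ [x]) =
      ((pvAfold p).1.insert x (p.length : Int),
        if (pvAfold p).1.contains x then
          some (pvMinInf (pvAfold p).2 ((p.length : Int) - (pvAfold p).1.getD x 0))
        else (pvAfold p).2) := by
  unfold pvAfold
  rw [PySem.List.enumerate_append, List.foldl_append]
  simp [PySem.List.enumerate_cons, PySem.List.enumerate_nil]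

lemma pvAfold_inv (p : List String) :
    (∀ w, (pvAfold p).1.get? w = (pvOcc p w).getLast?) ∧
      (pvAfold p).2 = pvBig (fun w => pvGmin (pvOcc p w)) (PySem.List.dedup p) := by
  induction p using List.reverseRecOn with
  | nil =>
    constructor
    · intro w
      simp [pvAfold, PySem.List.enumerate_nil, pvOcc, PySem.Dict.get?_empty]
    · rfl
  | append_singleton p x ih =>
    obtain ⟨ihd, ihb⟩ := ih
    rw [pvAfold_snoc]
    constructor
    · intro w
      rw [PySem.Dict.get?_insert, pvOcc_snoc]
      by_cases hw : w = x
      · simp [hw]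
      · rw [if_neg (fun h : x = w => hw h.symm), List.append_nil, ihd w]
        simp [hw]
    · by_cases hx : x ∈ p
      · -- x seen before: its occurrence list is nonempty
        have hne : pvOcc p x ≠ [] := fun h => ((pvOcc_eq_nil_iff p x).mp h) hx
        have hget : (pvAfold p).1.get? x = some ((pvOcc p x).getLast hne) := by
          rw [ihd x, List.getLast?_eq_some_getLast]
        have hcont : (pvAfold p).1.contains x = true := by
          rw [PySem.Dict.contains_eq_isSome_get?, hget]; rfl
        have hgetD : (pvAfold p).1.getD x 0 = (pvOcc p x).getLast hne := by
          rw [PySem.Dict.getD_eq_get?_getD, hget]; rfl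
        rw [hcont, if_pos rfl, hgetD, dedup_snoc, if_pos hx, ← omin_some, ihb]
        refine (pvBig_update _ _ _ x (some ((p.length : Int) - (pvOcc p x).getLast hne))
          (by simpa [PySem.List.dedup_eq_ofList, PySem.Set.mem_ofList] using hx) (PySem.List.nodup_dedup p) ?_ ?_).symm
        · intro w _ hwx
          rw [pvOcc_snoc, if_neg (fun h => hwx h.symm), List.append_nil]
        · rw [pvOcc_snoc, if_pos rfl, pvGmin_snoc _ _ hne]
      · -- first occurrence of x
        have hnil : pvOcc p x = [] := (pvOcc_eq_nil_iff p x).mpr hx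
        have hcont : (pvAfold p).1.contains x = false := by
          rw [PySem.Dict.contains_eq_isSome_get?, ihd x, hnil]; rfl
        rw [hcont, if_neg (by simp), dedup_snoc, if_neg hx, pvBig_snoc, ihb]
        have hx' : pvGmin (pvOcc (p ++ [x]) x) = none := by
          rw [pvOcc_snoc, if_pos rfl, hnil]; rfl
        rw [hx', omin_none_right]
        exact (pvBig_congr _ _ _ (fun w hw => by
          rw [pvOcc_snoc, if_neg (fun h : x = w => hx (h ▸ (by simpa [PySem.List.dedup_eq_ofList, PySem.Set.mem_ofList] using hw : w ∈ p))), List.append_nil])).symm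

lemma B_eq (p : List String) :
    find_nearest_repetition_alt p =
      match pvBig (fun w => pvGmin (pvOcc p w)) (PySem.List.dedup p) with
      | some v => v | none => -1 := by
  unfold find_nearest_repetition_alt
  have hmap : (PySem.List.enumerate p).foldl
      (fun (d : PySem.Dict String (List Int)) q => d.modify q.2 [] (· ++ [q.1])) PySem.Dict.empty
      = ((PySem.List.enumerate p).map (fun q => (q.2, q.1))).foldl
          (fun d r => d.modify r.1 [] (· ++ [r.2])) PySem.Dict.empty := by
    rw [List.foldl_map]
  have hkeys : ((PySem.List.enumerate p).foldl
      (fun (d : PySem.Dict String (List Int)) q => d.modify q.2 [] (· ++ [q.1]))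
      PySem.Dict.empty).keys = PySem.List.dedup p := by
    rw [PySem.Dict.keys_foldl_modify_key]
    simp only [PySem.List.map_snd_enumerate, PySem.List.dedup_eq_ofList, PySem.Dict.keys_empty]
    rfl
  have hnd : ((PySem.List.enumerate p).foldl
      (fun (d : PySem.Dict String (List Int)) q => d.modify q.2 [] (· ++ [q.1]))
      PySem.Dict.empty).keys.Nodup := by
    exact PySem.Dict.nodup_keys_foldl_modify_key _ _ _ _ _ (by simp [PySem.Dict.keys_empty])
  have hgetD : ∀ w, ((PySem.List.enumerate p).foldl
      (fun (d : PySem.Dict String (List Int)) q => d.modify q.2 [] (· ++ [q.1]))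
      PySem.Dict.empty).getD w [] = pvOcc p w := by
    intro w
    rw [hmap, PySem.Dict.getD_foldl_modify_append]
    simp [PySem.Dict.getD_empty, List.filter_map, pvOcc, Function.comp_def]
  have hvals : ((PySem.List.enumerate p).foldl
      (fun (d : PySem.Dict String (List Int)) q => d.modify q.2 [] (· ++ [q.1]))
      PySem.Dict.empty).values = (PySem.List.dedup p).map (fun w => pvOcc p w) := by
    rw [PySem.Dict.values_eq_map_keys _ hnd []]
    rw [hkeys]
    exact List.map_congr_left (fun w _ => hgetD w)
  show (match ((PySem.List.enumerate p).foldl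
      (fun (d : PySem.Dict String (List Int)) q => d.modify q.2 [] (· ++ [q.1]))
      PySem.Dict.empty).values.foldl
      (fun acc idxs => (idxs.zip idxs.tail).foldl
        (fun (a : Option Int) pr => some (pvMinInf a (pr.2 - pr.1))) acc) (none : Option Int) with
    | some v => v | none => -1) = _
  rw [hvals]
  have hfun : (fun (a : Option Int) (pr : Int × Int) => some (pvMinInf a (pr.2 - pr.1)))
      = fun a pr => omin a (some (pr.2 - pr.1)) := by
    funext a pr; cases a <;> rfl
  rw [List.foldl_map, hfun]
  have hinner : ∀ (acc : Option Int) (l : List Int),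
      (l.zip l.tail).foldl (fun a pr => omin a (some (pr.2 - pr.1))) acc = omin acc (pvGmin l) :=
    fun acc l => foldl_omin_pull _ _ acc
  simp only [hinner]
  rfl

-- ===== VERDICT (by name: the statement is the Claim_ definition above) =====
theorem find_nearest_repetition_spec : Claim_equal_find_nearest_repetition := by
  intro p _
  unfold Spec_find_nearest_repetition
  rw [B_eq]
  show (match (pvAfold p).2 with | some v => v | none => -1) = _
  rw [(pvAfold_inv p).2]
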